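-- pv_equiv track=rewrite | github.com/Alaflipo/AdventOfCode | 2024/day7/day7.py | find_calibration
-- ===== SOURCE A (Python) =====
-- def find_calibration(current_total, goal, numbers):
--     if (current_total == goal):
--         return True
--     if (len(numbers) == 0):
--         return False
--
--     plus_route = find_calibration(current_total + numbers[0], goal, numbers[1:])
--     times_route = find_calibration(current_total * numbers[0], goal, numbers[1:])
--
--     return plus_route or times_route
-- ===== SOURCE B (Python) =====
-- def find_calibration(current_total, goal, numbers):
--     # Explicit DFS stack instead of recursion; goal is tested at pop time
--     # on every state, so A's mid-sequence early return is preserved.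
--     stack = [(current_total, numbers)]
--     while stack:
--         total, rest = stack.pop()
--         if total == goal:
--             return True
--         if rest:
--             stack.append((total + rest[0], rest[1:]))
--             stack.append((total * rest[0], rest[1:]))
--     return False
-- ===== Notes on version B (the rewrite author's own statement) =====
-- stated objective: alternative
-- what changed: The binary recursion over +/* choices is replaced by an iterative DFS with an explicit stack of (total, remaining-numbers) states, testing the goal when a state is popped.
import Mathlib
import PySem

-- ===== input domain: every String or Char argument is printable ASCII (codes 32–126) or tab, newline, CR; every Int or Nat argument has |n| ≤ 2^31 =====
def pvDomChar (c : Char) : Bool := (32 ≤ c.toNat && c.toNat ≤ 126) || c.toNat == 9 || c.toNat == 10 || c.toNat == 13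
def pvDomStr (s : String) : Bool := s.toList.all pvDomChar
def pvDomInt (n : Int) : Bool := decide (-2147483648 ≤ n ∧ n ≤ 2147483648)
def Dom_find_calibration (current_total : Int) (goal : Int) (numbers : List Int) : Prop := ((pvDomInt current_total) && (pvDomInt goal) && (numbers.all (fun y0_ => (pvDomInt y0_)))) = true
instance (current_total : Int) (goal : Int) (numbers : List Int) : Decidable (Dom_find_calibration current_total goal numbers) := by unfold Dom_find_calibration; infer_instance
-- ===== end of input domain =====

-- B replaces the binary recursion over +/* by an iterative DFS over an explicit stack
-- of (total, remaining-numbers) states (objective: alternative decomposition, same cost).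

-- ===== PORT A =====
def find_calibration (current_total : Int) (goal : Int) (numbers : List Int) : Bool :=
  if current_total = goal then true
  else match numbers with
    | [] => false
    | x :: rest =>
      let plus_route := find_calibration (current_total + x) goal rest
      let times_route := find_calibration (current_total * x) goal rest
      plus_route || times_route

-- ===== PORT B =====
-- the while loop of Source B: pop the top state, test the goal, push the two successors
def fcLoop (goal : Int) : List (Int × List Int) → Bool
  | [] => false
  | (total, rest) :: stack =>
    if total = goal then true
    else match rest with
      | [] => fcLoop goal stack
      | x :: rs => fcLoop goal ((total * x, rs) :: (total + x, rs) :: stack)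
termination_by stack => (stack.map (fun p => 3 ^ p.2.length)).sum
decreasing_by
  · simp only [List.map_cons, List.sum_cons, List.length_nil, pow_zero]
    omega
  · simp only [List.map_cons, List.sum_cons, List.length_cons, pow_succ]
    have h3 : 0 < (3:ℕ) ^ rs.length := by positivity
    omega

def find_calibration_alt (current_total : Int) (goal : Int) (numbers : List Int) : Bool :=
  fcLoop goal [(current_total, numbers)]

-- ===== PRECONDITION & SPEC =====
def Spec_find_calibration (current_total : Int) (goal : Int) (numbers : List Int) (out : Bool) : Prop := out = find_calibration_alt current_total goal numbers
instance (current_total : Int) (goal : Int) (numbers : List Int) (out : Bool) : Decidable (Spec_find_calibration current_total goal numbers out) := by unfold Spec_find_calibration; infer_instance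

-- ===== CLAIM (what is proved, stated in full; the proofs are below) =====
def Claim_equal_find_calibration : Prop := ∀ (current_total : Int) (goal : Int) (numbers : List Int), Dom_find_calibration current_total goal numbers → Spec_find_calibration current_total goal numbers (find_calibration current_total goal numbers)

-- ===== LEMMAS AND PROOFS =====

-- loop invariant: the loop returns true iff some stacked state succeeds under A
theorem fcLoop_eq_any (goal : Int) (stack : List (Int × List Int)) :
    fcLoop goal stack = stack.any (fun p => find_calibration p.1 goal p.2) := by
  fun_induction fcLoop goal stack with
  | case1 => simp
  | case2 rest stack =>
    have : find_calibration goal goal rest = true := by unfold find_calibration; simp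
    simp [List.any_cons, this]
  | case3 total stack htg ih =>
    simp [List.any_cons, find_calibration, htg, ih]
  | case4 total stack htg x rs ih =>
    simp only [List.any_cons] at ih ⊢
    rw [ih]
    conv_rhs => rw [show find_calibration total goal (x :: rs) =
      (find_calibration (total + x) goal rs || find_calibration (total * x) goal rs) by
        simp [find_calibration, htg]]
    cases find_calibration (total + x) goal rs <;>
      cases find_calibration (total * x) goal rs <;> simp

-- ===== VERDICT (by name: the statement is the Claim_ definition above) =====
theorem find_calibration_spec : Claim_equal_find_calibration := by
  intro c g ns _
  unfold Spec_find_calibration find_calibration_alt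
  rw [fcLoop_eq_any]
  simp
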